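-- pv_equiv track=rewrite | github.com/benjaminsnorris/storyforge | scripts/lib/python/storyforge/annotations.py | generate_revision_findings
-- ===== SOURCE A (Python) =====
-- def generate_revision_findings(
--     annotations: dict[str, dict[str, str]],
-- ) -> tuple[list[dict], list[dict], list[dict]]:
--     """Generate revision findings from unaddressed annotations.
--
--     Groups annotations by scene and fix_location. Only includes annotations
--     with status 'new'.
--
--     Args:
--         annotations: Dict of annotations keyed by ID.
--
--     Returns:
--         Tuple of (craft_findings, structural_findings, protection_passages).
--         craft_findings: list of {scene_id, guidance} for pink annotations.
--         structural_findings: list of {scene_id, guidance} for orange annotations.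
--         protection_passages: list of {scene_id, text, note} for green annotations.
--     """
--     actionable = [a for a in annotations.values() if a.get('status') == 'new']
--
--     craft_by_scene: dict[str, list[dict]] = {}
--     structural_by_scene: dict[str, list[dict]] = {}
--     protection_list: list[dict] = []
--
--     for ann in actionable:
--         scene_id = ann.get('scene_id', '')
--         fix_loc = ann.get('fix_location', '')
--
--         if fix_loc == 'craft':
--             craft_by_scene.setdefault(scene_id, []).append(ann)
--         elif fix_loc == 'structural':
--             structural_by_scene.setdefault(scene_id, []).append(ann)
--         elif fix_loc in ('protection', 'exemplar'):
--             protection_list.append({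
--                 'scene_id': scene_id,
--                 'text': ann.get('text', ''),
--                 'note': ann.get('note', ''),
--             })
--
--     craft_findings = []
--     for scene_id, anns in sorted(craft_by_scene.items()):
--         parts = []
--         for i, ann in enumerate(anns, 1):
--             text = ann.get('text', '')[:100]
--             note = ann.get('note', '')
--             label = ann.get('color_label', ann.get('color', ''))
--             entry = f'{i}. "{text}"'
--             if note:
--                 entry += f' — Reader note: "{note}"'
--             else:
--                 entry += ' — (no note)'
--             parts.append(entry)
--         guidance = (
--             f'Scene "{scene_id}" — {len(anns)} reader annotation(s) ({label}):\n'
--             + '\n'.join(parts)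
--         )
--         craft_findings.append({'scene_id': scene_id, 'guidance': guidance})
--
--     structural_findings = []
--     for scene_id, anns in sorted(structural_by_scene.items()):
--         parts = []
--         for i, ann in enumerate(anns, 1):
--             text = ann.get('text', '')[:100]
--             note = ann.get('note', '')
--             entry = f'{i}. "{text}"'
--             if note:
--                 entry += f' — Reader note: "{note}"'
--             parts.append(entry)
--         guidance = (
--             f'Scene "{scene_id}" — {len(anns)} reader annotation(s) (Cut / Reconsider):\n'
--             + '\n'.join(parts)
--         )
--         structural_findings.append({'scene_id': scene_id, 'guidance': guidance})
--
--     return craft_findings, structural_findings, protection_list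
-- ===== SOURCE B (Python) =====
-- def _entry(i, a, structural_mode):
--     e = f'{i}. "{a.get("text", "")[:100]}"'
--     note = a.get('note', '')
--     if note:
--         return e + f' — Reader note: "{note}"'
--     if structural_mode:
--         return e
--     return e + ' — (no note)'
--
--
-- def _findings(anns, structural_mode):
--     out = []
--     for sid in sorted({a.get('scene_id', '') for a in anns}):
--         group = [a for a in anns if a.get('scene_id', '') == sid]
--         parts = [_entry(i, a, structural_mode) for i, a in enumerate(group, 1)]
--         last = group[-1]
--         label = ('Cut / Reconsider' if structural_mode
--                  else last.get('color_label', last.get('color', '')))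
--         guidance = (f'Scene "{sid}" — {len(group)} reader annotation(s) ({label}):\n'
--                     + '\n'.join(parts))
--         out.append({'scene_id': sid, 'guidance': guidance})
--     return out
--
--
-- def generate_revision_findings(annotations):
--     vals = [a for a in annotations.values() if a.get('status') == 'new']
--     craft = [a for a in vals if a.get('fix_location', '') == 'craft']
--     structural = [a for a in vals if a.get('fix_location', '') == 'structural']
--     protection = [
--         {'scene_id': a.get('scene_id', ''), 'text': a.get('text', ''), 'note': a.get('note', '')}
--         for a in vals if a.get('fix_location', '') in ('protection', 'exemplar')
--     ]
--     return _findings(craft, False), _findings(structural, True), protection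
-- ===== Notes on version B (the rewrite author's own statement) =====
-- stated objective: simpler
-- what changed: B replaces A's one-pass setdefault-bucketing into two dicts followed by sorted(dict.items()) with three filter comprehensions plus a shared per-scene formatter that sorts the set of scene ids and filters the group per id, factoring the entry formatting (craft '(no note)' suffix and last-annotation label kept) into one helper.
import Mathlib
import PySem

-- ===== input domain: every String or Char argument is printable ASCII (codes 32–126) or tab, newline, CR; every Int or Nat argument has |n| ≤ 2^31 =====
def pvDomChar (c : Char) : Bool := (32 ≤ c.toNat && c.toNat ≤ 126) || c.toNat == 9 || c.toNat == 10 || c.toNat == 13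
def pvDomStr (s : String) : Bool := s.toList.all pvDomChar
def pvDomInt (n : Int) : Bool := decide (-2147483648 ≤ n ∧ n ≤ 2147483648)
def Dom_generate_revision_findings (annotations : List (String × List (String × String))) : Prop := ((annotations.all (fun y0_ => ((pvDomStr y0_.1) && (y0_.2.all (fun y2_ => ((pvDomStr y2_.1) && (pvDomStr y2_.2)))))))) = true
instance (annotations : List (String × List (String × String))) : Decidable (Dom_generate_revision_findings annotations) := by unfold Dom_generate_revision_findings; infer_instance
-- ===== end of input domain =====

-- B groups by sorting the distinct scene ids and filtering per id, with a shared entry formatter,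
-- instead of A's setdefault-bucketing into dicts; objective: simpler decomposition (not faster).
-- Strings are built as List Char (PySem.Chars) and wrapped with String.ofList at the end, since
-- Lean's own String.append is opaque to the kernel.

-- ===== PORT A =====
-- ann.get(k, d)  (shared field accessor; both Pythons call dict.get)
def pvGet (ann : List (String × String)) (k : String) (d : String) : String :=
  PySem.Dict.getD (PySem.Dict.mk ann) k d

-- A's loop state: (craft_by_scene, structural_by_scene, protection_list)
def pvStateA : Type :=
  PySem.Dict String (List (List (String × String))) ×
  PySem.Dict String (List (List (String × String))) × List (List (String × String))

-- the body of A's bucketing loop; setdefault(scene_id, []).append(ann) = modify scene_id [] (· ++ [ann])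
def pvStepA (st : pvStateA) (ann : List (String × String)) : pvStateA :=
  let scene_id := pvGet ann "scene_id" ""
  let fix_loc := pvGet ann "fix_location" ""
  if fix_loc == "craft" then
    (PySem.Dict.modify st.1 scene_id [] (fun l => l ++ [ann]), st.2.1, st.2.2)
  else if fix_loc == "structural" then
    (st.1, PySem.Dict.modify st.2.1 scene_id [] (fun l => l ++ [ann]), st.2.2)
  else if fix_loc == "protection" || fix_loc == "exemplar" then
    (st.1, st.2.1, st.2.2 ++
      [[("scene_id", scene_id), ("text", pvGet ann "text" ""), ("note", pvGet ann "note" "")]])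
  else st

-- the body of A's craft 'for i, ann in enumerate(anns, 1)' loop; state = (parts, label)
def pvCraftEntryA (pl : List (List Char) × String) (ia : Int × List (String × String)) :
    List (List Char) × String :=
  let ann := ia.2
  let text := PySem.List.slice (pvGet ann "text" "").toList none (some 100)
  let note := pvGet ann "note" ""
  let label := PySem.Dict.getD (PySem.Dict.mk ann) "color_label" (pvGet ann "color" "")
  let entry := PySem.Int.toChars ia.1 ++ ". \"".toList ++ text ++ "\"".toList
  let entry := if note != "" then
      entry ++ " — Reader note: \"".toList ++ note.toList ++ "\"".toList
    else entry ++ " — (no note)".toList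
  (pl.1 ++ [entry], label)

-- the body of one iteration of A's craft_findings loop
def pvCraftFmtA (p : String × List (List (String × String))) : List (String × String) :=
  let scene_id := p.1
  let anns := p.2
  -- label's initial value "" is never read: every bucket is nonempty
  let r := (PySem.List.enumerate anns 1).foldl pvCraftEntryA ([], "")
  let guidance := String.ofList ("Scene \"".toList ++ scene_id.toList ++ "\" — ".toList
      ++ PySem.Int.toChars (anns.length : Int) ++ " reader annotation(s) (".toList
      ++ r.2.toList ++ "):\n".toList ++ PySem.Chars.join "\n".toList r.1)
  [("scene_id", scene_id), ("guidance", guidance)]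

-- the body of A's structural 'for i, ann in enumerate(anns, 1)' loop
def pvStructEntryA (pl : List (List Char)) (ia : Int × List (String × String)) :
    List (List Char) :=
  let ann := ia.2
  let text := PySem.List.slice (pvGet ann "text" "").toList none (some 100)
  let note := pvGet ann "note" ""
  let entry := PySem.Int.toChars ia.1 ++ ". \"".toList ++ text ++ "\"".toList
  let entry := if note != "" then
      entry ++ " — Reader note: \"".toList ++ note.toList ++ "\"".toList
    else entry
  pl ++ [entry]

-- the body of one iteration of A's structural_findings loop
def pvStructFmtA (p : String × List (List (String × String))) : List (String × String) :=
  let scene_id := p.1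
  let anns := p.2
  let parts := (PySem.List.enumerate anns 1).foldl pvStructEntryA []
  let guidance := String.ofList ("Scene \"".toList ++ scene_id.toList ++ "\" — ".toList
      ++ PySem.Int.toChars (anns.length : Int)
      ++ " reader annotation(s) (Cut / Reconsider):\n".toList
      ++ PySem.Chars.join "\n".toList parts)
  [("scene_id", scene_id), ("guidance", guidance)]

def generate_revision_findings (annotations : List (String × List (String × String))) : (List (List (String × String))) × (List (List (String × String))) × (List (List (String × String))) :=
  -- actionable = [a for a in annotations.values() if a.get('status') == 'new']
  let actionable := (annotations.map (fun kv => kv.2)).filter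
      (fun a => PySem.Dict.get? (PySem.Dict.mk a) "status" == some "new")
  let st : pvStateA := actionable.foldl pvStepA (PySem.Dict.mk [], PySem.Dict.mk [], [])
  -- sorted(craft_by_scene.items()): dict keys are distinct, so Python's tuple comparison is
  -- decided by the first component alone; key = fst is exact
  let craft_findings := (PySem.List.sorted st.1.items (fun p => p.1) false).foldl
      (fun acc p => acc ++ [pvCraftFmtA p]) []
  let structural_findings := (PySem.List.sorted st.2.1.items (fun p => p.1) false).foldl
      (fun acc p => acc ++ [pvStructFmtA p]) []
  (craft_findings, structural_findings, st.2.2)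

-- ===== PORT B =====
-- _entry(i, a, structural_mode)
def pvEntryB (structuralMode : Bool) (ia : Int × List (String × String)) : List Char :=
  let a := ia.2
  let e := PySem.Int.toChars ia.1 ++ ". \"".toList
      ++ PySem.List.slice (pvGet a "text" "").toList none (some 100) ++ "\"".toList
  let note := pvGet a "note" ""
  if note != "" then e ++ " — Reader note: \"".toList ++ note.toList ++ "\"".toList
  else if structuralMode then e
  else e ++ " — (no note)".toList

-- _findings(anns, structural_mode): sorted set of scene ids, then filter per id
def pvFindingsB (anns : List (List (String × String))) (structuralMode : Bool) :
    List (List (String × String)) :=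
  (PySem.List.sorted (PySem.Set.ofList (anns.map (fun a => pvGet a "scene_id" "")))
      (fun x => x) false).map
    (fun sid =>
      let group := anns.filter (fun a => pvGet a "scene_id" "" == sid)
      let parts := (PySem.List.enumerate group 1).map (pvEntryB structuralMode)
      let last := group.getLastD []   -- group[-1]; group is nonempty by construction
      let label := if structuralMode then "Cut / Reconsider".toList
        else (PySem.Dict.getD (PySem.Dict.mk last) "color_label" (pvGet last "color" "")).toList
      let guidance := String.ofList ("Scene \"".toList ++ sid.toList ++ "\" — ".toList
          ++ PySem.Int.toChars (group.length : Int) ++ " reader annotation(s) (".toList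
          ++ label ++ "):\n".toList ++ PySem.Chars.join "\n".toList parts)
      [("scene_id", sid), ("guidance", guidance)])

def generate_revision_findings_alt (annotations : List (String × List (String × String))) : (List (List (String × String))) × (List (List (String × String))) × (List (List (String × String))) :=
  let vals := (annotations.map (fun kv => kv.2)).filter
      (fun a => PySem.Dict.get? (PySem.Dict.mk a) "status" == some "new")
  let craft := vals.filter (fun a => pvGet a "fix_location" "" == "craft")
  let structural := vals.filter (fun a => pvGet a "fix_location" "" == "structural")
  let protection := (vals.filter (fun a =>
      pvGet a "fix_location" "" == "protection" || pvGet a "fix_location" "" == "exemplar")).map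
    (fun a => [("scene_id", pvGet a "scene_id" ""), ("text", pvGet a "text" ""),
               ("note", pvGet a "note" "")])
  (pvFindingsB craft false, pvFindingsB structural true, protection)

-- ===== PRECONDITION & SPEC =====
def Spec_generate_revision_findings (annotations : List (String × List (String × String))) (out : (List (List (String × String))) × (List (List (String × String))) × (List (List (String × String)))) : Prop := out = generate_revision_findings_alt annotations
instance (annotations : List (String × List (String × String))) (out : (List (List (String × String))) × (List (List (String × String))) × (List (List (String × String)))) : Decidable (Spec_generate_revision_findings annotations out) := by unfold Spec_generate_revision_findings; infer_instance

-- ===== CLAIM (what is proved, stated in full; the proofs are below) =====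
def Claim_equal_generate_revision_findings : Prop := ∀ (annotations : List (String × List (String × String))), Dom_generate_revision_findings annotations → Spec_generate_revision_findings annotations (generate_revision_findings annotations)

-- ===== LEMMAS AND PROOFS =====

def pvKey (a : List (String × String)) : String := pvGet a "scene_id" ""
def pvBucket (d : PySem.Dict String (List (List (String × String))))
    (l : List (List (String × String))) : PySem.Dict String (List (List (String × String))) :=
  l.foldl (fun d a => d.modify (pvKey a) [] (fun g => g ++ [a])) d

-- A's single bucketing loop = two bucket folds + one filtered map
theorem pvA_partition (l : List (List (String × String)))
    (d1 d2 : PySem.Dict String (List (List (String × String))))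
    (pl : List (List (String × String))) :
    l.foldl pvStepA ((d1, d2, pl) : pvStateA)
    = (pvBucket d1 (l.filter (fun a => pvGet a "fix_location" "" == "craft")),
       pvBucket d2 (l.filter (fun a => pvGet a "fix_location" "" == "structural")),
       pl ++ (l.filter (fun a =>
           pvGet a "fix_location" "" == "protection" || pvGet a "fix_location" "" == "exemplar")).map
         (fun a => [("scene_id", pvGet a "scene_id" ""), ("text", pvGet a "text" ""),
                    ("note", pvGet a "note" "")])) := by
  induction l generalizing d1 d2 pl with
  | nil => simp [pvBucket]
  | cons a t ih =>
    simp only [List.foldl_cons, List.filter_cons]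
    simp only [pvBucket, pvKey, pvStepA, beq_iff_eq, Bool.or_eq_true_iff] at ih ⊢
    by_cases hc : pvGet a "fix_location" "" = "craft"
    · simp [hc, ih]
    · by_cases hs : pvGet a "fix_location" "" = "structural"
      · simp [hs, ih]
      · by_cases hp : pvGet a "fix_location" "" = "protection" ∨ pvGet a "fix_location" "" = "exemplar"
        · rcases hp with h' | h' <;> simp [h', ih]
        · rw [not_or] at hp
          simp [hc, hs, hp.1, hp.2, ih]

-- each bucket holds exactly the annotations with that scene id, in order
theorem pvBucket_getD (l : List (List (String × String))) (c : String) :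
    (pvBucket (PySem.Dict.mk []) l).getD c []
    = l.filter (fun a => pvKey a == c) := by
  have h := PySem.Dict.getD_foldl_modify_append (l.map (fun a => (pvKey a, a))) (PySem.Dict.mk []) c
  rw [List.foldl_map] at h
  simpa [pvBucket, List.filter_map, Function.comp_def, List.map_map] using h

-- the bucket dict's items, sorted by key = sorted distinct keys paired with per-key filters
theorem pvBucket_sorted_items (l : List (List (String × String))) :
    PySem.List.sorted (pvBucket (PySem.Dict.mk []) l).items (fun p => p.1) false
    = (PySem.List.sorted (PySem.Set.ofList (l.map pvKey)) (fun x => x) false).map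
        (fun k => (k, l.filter (fun a => pvKey a == k))) := by
  have hkeys : (pvBucket (PySem.Dict.mk []) l).keys = PySem.Set.ofList (l.map pvKey) := by
    have h := PySem.Dict.keys_foldl_modify_key l pvKey [] (fun _ a g => g ++ [a]) (PySem.Dict.mk [])
    simpa [pvBucket, PySem.Set.update_nil_left] using h
  have hnd : (pvBucket (PySem.Dict.mk []) l).keys.Nodup := by
    rw [hkeys]; exact PySem.Set.nodup_ofList _
  have hitems : (pvBucket (PySem.Dict.mk []) l).items
      = (PySem.Set.ofList (l.map pvKey)).map (fun k => (k, l.filter (fun a => pvKey a == k))) := by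
    rw [PySem.Dict.items_eq_map_keys _ hnd [], hkeys]
    exact List.map_congr_left (fun k _ => by rw [pvBucket_getD])
  apply PySem.List.sorted_eq_of_perm_of_pairwise_lt
  · rw [hitems]
    exact (PySem.List.sorted_perm _ _ _).map _
  · have := PySem.List.sorted_ofList_pairwise_lt (l.map pvKey)
    exact (List.pairwise_map).mpr (by simpa using this)

-- A's craft inner loop = mapped entries + the last annotation's label
theorem pvA_craft_fold (anns : List (List (String × String))) (s : Int)
    (ps : List (List Char)) (lab : String) :
    (PySem.List.enumerate anns s).foldl pvCraftEntryA ((ps, lab))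
    = (ps ++ (PySem.List.enumerate anns s).map (pvEntryB false),
       match anns.getLast? with
       | none => lab
       | some a => PySem.Dict.getD (PySem.Dict.mk a) "color_label" (pvGet a "color" "")) := by
  induction anns using List.reverseRecOn generalizing s ps lab with
  | nil => simp [PySem.List.enumerate]
  | append_singleton t a ih =>
    rw [PySem.List.enumerate_append, List.foldl_append, ih]
    simp [PySem.List.enumerate, pvCraftEntryA, pvEntryB]

-- A's structural inner loop = mapped entries
theorem pvA_struct_fold (anns : List (List (String × String))) (s : Int)
    (ps : List (List Char)) :
    (PySem.List.enumerate anns s).foldl pvStructEntryA ps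
    = ps ++ (PySem.List.enumerate anns s).map (pvEntryB true) := by
  induction anns using List.reverseRecOn generalizing s ps with
  | nil => simp [PySem.List.enumerate]
  | append_singleton t a ih =>
    rw [PySem.List.enumerate_append, List.foldl_append, ih]
    simp [PySem.List.enumerate, pvStructEntryA, pvEntryB]

-- per-scene: A's craft formatting of (k, group) = B's craft formatting of k
theorem pvCraftFmt_eq (l : List (List (String × String))) (k : String) :
    pvCraftFmtA (k, l.filter (fun a => pvGet a "scene_id" "" == k))
    = (let group := l.filter (fun a => pvGet a "scene_id" "" == k)
       let parts := (PySem.List.enumerate group 1).map (pvEntryB false)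
       let last := group.getLastD []
       let label := (PySem.Dict.getD (PySem.Dict.mk last) "color_label" (pvGet last "color" "")).toList
       [("scene_id", k), ("guidance", String.ofList ("Scene \"".toList ++ k.toList ++ "\" — ".toList
          ++ PySem.Int.toChars (group.length : Int) ++ " reader annotation(s) (".toList
          ++ label ++ "):\n".toList ++ PySem.Chars.join "\n".toList parts))]) := by
  simp only [pvCraftFmtA, pvA_craft_fold, List.nil_append]
  cases h : (l.filter (fun a => pvGet a "scene_id" "" == k)).getLast? with
  | none =>
    rw [List.getLast?_eq_none_iff] at h
    rw [h]
    rfl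
  | some a =>
    simp [h]

-- ===== VERDICT (by name: the statement is the Claim_ definition above) =====
theorem generate_revision_findings_spec : Claim_equal_generate_revision_findings := by
  intro annotations _
  unfold Spec_generate_revision_findings
  simp only [generate_revision_findings, generate_revision_findings_alt]
  rw [pvA_partition, pvBucket_sorted_items, pvBucket_sorted_items,
     PySem.List.foldl_append_singleton_eq_map, PySem.List.foldl_append_singleton_eq_map,
     List.map_map, List.map_map]
  simp only [pvFindingsB, pvKey]
  refine Prod.ext ?_ (Prod.ext ?_ rfl)
  · refine List.map_congr_left fun k hk => ?_
    exact pvCraftFmt_eq _ k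
  · refine List.map_congr_left fun k hk => ?_
    simp only [Function.comp_apply, pvStructFmtA, pvA_struct_fold, List.nil_append, if_true]
    simp [List.append_assoc]
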